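-- pv_equiv track=rewrite | github.com/bigfrog10/python-data-structure-algo-tutorial | src/dsa/point72/max_streak/max_streak.py | max_showup
-- ===== SOURCE A (Python) =====
-- def max_showup(attendences: list) -> int:
--     if not attendences:
--         return 0
--
--     # number of days and number of employees
--     nd, ne = len(attendences), len(attendences[0])
--     a = attendences
--
--     start, walker = -1, 0
--     all_attn = 'Y' * ne
--     maxa = 0
--     while walker < nd:
--         if a[walker] == all_attn:
--             if start == -1:
--                 start = walker  # mark start of full attn
--             walker += 1
--         else:
--             if start >= 0:
--                 maxa = max(maxa, walker-start)
--                 start = -1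
--             walker += 1
--     else:
--         if start >= 0:
--             maxa = max(maxa, walker-start)
--
--     return maxa
-- ===== SOURCE B (Python) =====
-- def max_showup(attendences: list) -> int:
--     if not attendences:
--         return 0
--     full = 'Y' * len(attendences[0])
--     n = len(attendences)
--     best = 0
--     i = 0
--     while i < n:
--         if attendences[i] == full:
--             j = i
--             while j < n and attendences[j] == full:
--                 j += 1
--             best = max(best, j - i)
--             i = j
--         else:
--             i += 1
--     return best
-- ===== Notes on version B (the rewrite author's own statement) =====
-- stated objective: alternative
-- what changed: Replaces A's start-index/-1 sentinel streak tracking with a run-consuming scan: when a full-attendance day is seen, the whole maximal run of full days is measured at once with an inner counting loop and skipped past, so no marker state or end-of-loop flush is needed.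
import Mathlib
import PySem

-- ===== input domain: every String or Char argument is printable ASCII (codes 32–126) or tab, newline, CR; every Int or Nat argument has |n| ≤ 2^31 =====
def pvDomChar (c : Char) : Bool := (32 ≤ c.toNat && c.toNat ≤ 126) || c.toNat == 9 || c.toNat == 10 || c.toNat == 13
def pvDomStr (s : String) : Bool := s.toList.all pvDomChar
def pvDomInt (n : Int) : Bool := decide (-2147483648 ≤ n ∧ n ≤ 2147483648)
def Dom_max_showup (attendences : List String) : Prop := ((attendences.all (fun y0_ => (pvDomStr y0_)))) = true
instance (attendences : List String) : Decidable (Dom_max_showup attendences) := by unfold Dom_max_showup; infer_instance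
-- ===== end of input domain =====

-- B replaces A's start-index/-1 sentinel streak tracking with a run-consuming scan
-- (measure each maximal run of full days at once, slice it off); alternative, same cost.

-- ===== PORT A =====
-- A's while loop over walker; the remaining suffix of the list stands for a[walker:],
-- walker/start/maxa are the Python Int state. String equality a[walker] == all_attn is
-- compared on .toList (exact: two Python strs are equal iff their char lists are).
def pvALoop (full : List Char) : List String → Int → Int → Int → Int
  | [], walker, start, maxa =>
      -- while's else clause: if start >= 0: maxa = max(maxa, walker-start)
      if 0 ≤ start then max maxa (walker - start) else maxa
  | x :: xs, walker, start, maxa =>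
      if x.toList = full then
        pvALoop full xs (walker + 1) (if start = -1 then walker else start) maxa
      else
        pvALoop full xs (walker + 1) (-1)
          (if 0 ≤ start then max maxa (walker - start) else maxa)

def max_showup (attendences : List String) : Int :=
  match attendences with
  | [] => 0
  | h :: _ =>
      -- all_attn = 'Y' * ne, ne = len(attendences[0])
      pvALoop (List.replicate h.toList.length 'Y') attendences 0 (-1) 0

-- ===== PORT B =====
-- Source B's outer while over index i; the remaining list stands for attendences[i:].
-- On a full head, k = j - i = length of the prefix of full days (the inner counting
-- while), best = max(best, k), and i = j advances past the run (drop k).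
def pvFull (full : List Char) (s : String) : Bool := s.toList = full

def pvBLoop (full : List Char) : List String → Int → Int
  | [], best => best
  | x :: xs, best =>
      if x.toList = full then
        let k := ((x :: xs).takeWhile (pvFull full)).length
        pvBLoop full ((x :: xs).drop k) (max best (k : Int))
      else
        pvBLoop full xs best
  termination_by l _ => l.length
  decreasing_by
    · simp [pvFull, *]
    · simp

def max_showup_alt (attendences : List String) : Int :=
  match attendences with
  | [] => 0
  | h :: _ =>
      pvBLoop (List.replicate h.toList.length 'Y') attendences 0

-- ===== PRECONDITION & SPEC =====
def Spec_max_showup (attendences : List String) (out : Int) : Prop := out = max_showup_alt attendences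
instance (attendences : List String) (out : Int) : Decidable (Spec_max_showup attendences out) := by unfold Spec_max_showup; infer_instance

-- ===== CLAIM (what is proved, stated in full; the proofs are below) =====
def Claim_equal_max_showup : Prop := ∀ (attendences : List String), Dom_max_showup attendences → Spec_max_showup attendences (max_showup attendences)

-- ===== LEMMAS AND PROOFS =====

-- dropWhile is drop of the takeWhile-prefix length (rest = rest[k:] in Source B)
theorem pvDropTakeWhileLen (p : String → Bool) :
    ∀ l : List String, l.drop (l.takeWhile p).length = l.dropWhile p
  | [] => rfl
  | x :: xs => by
      by_cases h : p x <;>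
        simp [h, pvDropTakeWhileLen p xs]

-- Common reformulation: fold with (current streak, best) state.
def pvStreak (full : List Char) : List String → Int → Int → Int
  | [], c, m => max m c
  | x :: xs, c, m =>
      if x.toList = full then pvStreak full xs (c + 1) m
      else pvStreak full xs 0 (max m c)

theorem pvALoop_eq_streak (full : List Char) :
    ∀ (l : List String) (walker start maxa : Int), 0 ≤ maxa → 0 ≤ walker →
      start ≤ walker → (start = -1 ∨ 0 ≤ start) →
      pvALoop full l walker start maxa
        = pvStreak full l (if start = -1 then 0 else walker - start) maxa := by
  intro l
  induction l with
  | nil =>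
      intro walker start maxa hm hw hsw hs
      simp only [pvALoop, pvStreak]
      rcases hs with h | h <;> split_ifs <;> omega
  | cons x xs ih =>
      intro walker start maxa hm hw hsw hs
      simp only [pvALoop, pvStreak]
      by_cases hx : x.toList = full
      · simp only [hx, if_true]
        rw [ih _ _ _ hm (by omega) (by split_ifs <;> omega)
              (by rcases hs with h | h <;> split_ifs <;> omega)]
        congr 1
        rcases hs with h | h <;> split_ifs <;> omega
      · simp only [hx, if_false]
        rw [ih _ _ _ (by rcases hs with h | h <;> split_ifs <;> omega) (by omega)
              (by omega) (Or.inl rfl)]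
        simp only [if_pos]
        congr 1
        rcases hs with h | h <;> split_ifs <;> omega

theorem pvStreak_run (full : List Char) :
    ∀ (l : List String) (c m : Int), 0 ≤ m → 0 ≤ c →
      pvStreak full l c m
        = pvStreak full (l.dropWhile (pvFull full)) 0
            (max m (c + ((l.takeWhile (pvFull full)).length : Int))) := by
  intro l
  induction l with
  | nil =>
      intro c m hm hc
      simp only [pvStreak, List.dropWhile_nil, List.takeWhile_nil, List.length_nil]
      omega
  | cons x xs ih =>
      intro c m hm hc
      by_cases hx : x.toList = full
      · have hp : pvFull full x = true := by simp [pvFull, hx]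
        simp only [pvStreak, hx, List.dropWhile_cons, List.takeWhile_cons, hp,
          if_true, List.length_cons]
        rw [ih (c + 1) m hm (by omega)]
        congr 2
        push_cast
        ring
      · have hp : pvFull full x = false := by simp [pvFull, hx]
        have hd : (x :: xs).dropWhile (pvFull full) = x :: xs := by
          simp [hp]
        have ht : (x :: xs).takeWhile (pvFull full) = [] := by
          simp [hp]
        rw [hd, ht]
        simp only [List.length_nil, Nat.cast_zero, add_zero]
        simp only [pvStreak]
        split_ifs
        congr 1
        omega

theorem pvStreak_eq_bLoop (full : List Char) :
    ∀ (n : Nat) (l : List String) (m : Int), l.length ≤ n → 0 ≤ m →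
      pvStreak full l 0 m = pvBLoop full l m := by
  intro n
  induction n with
  | zero =>
      intro l m hl hm
      have : l = [] := List.eq_nil_of_length_eq_zero (by omega)
      subst this
      simp only [pvStreak, pvBLoop]
      omega
  | succ n ih =>
      intro l m hl hm
      match l with
      | [] =>
          simp only [pvStreak, pvBLoop]; omega
      | x :: xs =>
          by_cases hx : x.toList = full
          · have hp : pvFull full x = true := by simp [pvFull, hx]
            rw [pvStreak_run full (x :: xs) 0 m hm le_rfl]
            simp only [pvBLoop, hx]
            rw [← pvDropTakeWhileLen (pvFull full) (x :: xs)]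
            have hk : 1 ≤ ((x :: xs).takeWhile (pvFull full)).length := by
              simp [hp]
            have hlen : ((x :: xs).drop ((x :: xs).takeWhile (pvFull full)).length).length ≤ n := by
              simp only [List.length_drop, List.length_cons] at *
              omega
            rw [ih _ _ hlen (by positivity)]
            congr 1
            omega
          · have hconv : max m (0 : Int) = m := by omega
            simp only [pvStreak, hx, pvBLoop, hconv]
            exact ih xs m (by simp at hl; omega) hm

-- ===== VERDICT (by name: the statement is the Claim_ definition above) =====
theorem max_showup_spec : Claim_equal_max_showup := by
  intro attendences _
  unfold Spec_max_showup
  match attendences with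
  | [] => rfl
  | h :: t =>
      show pvALoop _ (h :: t) 0 (-1) 0 = pvBLoop _ (h :: t) 0
      rw [pvALoop_eq_streak _ (h :: t) 0 (-1) 0 le_rfl le_rfl (by omega) (Or.inl rfl)]
      simp only [if_pos]
      exact pvStreak_eq_bLoop _ (h :: t).length (h :: t) 0 le_rfl le_rfl
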